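-- pv_equiv track=rewrite | github.com/zsLin177/SRL-as-GP | supar/parsers/parser.py | produce_column_1
-- ===== SOURCE A (Python) =====
-- def produce_column_1(relas, prd_idx):
--     count = 0
--     column = []
--     # span_start = -1
--     i = 0
--     while (i < len(relas)):
--         rel = relas[i]
--         if ((i + 1) == prd_idx):
--             column.append('(V*)')
--             i += 1
--         elif(rel == ['[prd]']):
--             column.append('*')
--             i += 1
--         elif (len(rel) == 0):
--             column.append('*')
--             i += 1
--         else:
--             s_rel = rel[0]
--             position_tag = s_rel[0]
--             label = s_rel[2:]
--             if(position_tag == 'I'):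
--                 # pdb.set_trace()
--                 column.append('*')   # 直接把冲突的I删掉
--                 i += 1
--                 count += 1
--                 # pdb.set_trace()
--             else:
--                 span_start = i
--                 i += 1
--                 labels = {}
--                 labels[label] = 1
--                 while (i < len(relas) and len(relas[i]) > 0):
--                     if (relas[i][0][0] == 'I'):
--                         labels[relas[i][0][2:]] = labels.get(
--                             relas[i][0][2:], 0) + 1
--                         i += 1
--                     else:
--                         break
--                 length = i - span_start
--                 max_label = label
--                 max_num = 0
--                 for key, value in labels.items():
--                     if (value > max_num):
--                         max_num = value
--                         max_label = key
--                 if (length == 1):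
--                     column.append('(' + max_label + '*' + ')')
--                 else:
--                     column.append('(' + max_label + '*')
--                     column += ['*'] * (length - 2)
--                     column.append('*' + ')')
--     return column, count
-- ===== SOURCE B (Python) =====
-- def produce_column_1(relas, prd_idx):
--     # Pass 1: segment the relation list into markers and span records.
--     segs = []      # each entry: a ready output string, or (length, first_label, label_counts)
--     count = 0
--     n = len(relas)
--     i = 0
--     while i < n:
--         rel = relas[i]
--         if i + 1 == prd_idx:
--             segs.append('(V*)')
--             i += 1
--         elif rel == ['[prd]'] or len(rel) == 0:
--             segs.append('*')
--             i += 1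
--         elif rel[0][0] == 'I':
--             # an I-continuation with no open span is a conflict: drop it
--             segs.append('*')
--             count += 1
--             i += 1
--         else:
--             first = rel[0][2:]
--             labels = {first: 1}
--             j = i + 1
--             while j < n and len(relas[j]) > 0 and relas[j][0][0] == 'I':
--                 lab = relas[j][0][2:]
--                 labels[lab] = labels.get(lab, 0) + 1
--                 j += 1
--             segs.append((j - i, first, labels))
--             i = j
--     # Pass 2: render each segment to output cells.
--     column = []
--     for seg in segs:
--         if isinstance(seg, str):
--             column.append(seg)
--         else:
--             length, first, labels = seg
--             best, best_n = first, 0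
--             for k, v in labels.items():
--                 if v > best_n:
--                     best, best_n = k, v
--             if length == 1:
--                 column.append('(' + best + '*' + ')')
--             else:
--                 column.append('(' + best + '*')
--                 column += ['*'] * (length - 2)
--                 column.append('*' + ')')
--     return column, count
-- ===== Notes on version B (the rewrite author's own statement) =====
-- stated objective: alternative
-- what changed: B replaces A's single interleaved scan-and-emit loop by a two-phase pipeline: a first pass that parses the relation list into a segment list (markers and span records with an insertion-ordered label-count map), and a separate rendering pass that turns each segment into output cells via the strict-> argmax.
-- outside the precondition, e.g. on produce_column_1([['']], 1): A returns (['(V*)'], 0), B returns (['(V*)'], 0)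
import Mathlib
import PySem

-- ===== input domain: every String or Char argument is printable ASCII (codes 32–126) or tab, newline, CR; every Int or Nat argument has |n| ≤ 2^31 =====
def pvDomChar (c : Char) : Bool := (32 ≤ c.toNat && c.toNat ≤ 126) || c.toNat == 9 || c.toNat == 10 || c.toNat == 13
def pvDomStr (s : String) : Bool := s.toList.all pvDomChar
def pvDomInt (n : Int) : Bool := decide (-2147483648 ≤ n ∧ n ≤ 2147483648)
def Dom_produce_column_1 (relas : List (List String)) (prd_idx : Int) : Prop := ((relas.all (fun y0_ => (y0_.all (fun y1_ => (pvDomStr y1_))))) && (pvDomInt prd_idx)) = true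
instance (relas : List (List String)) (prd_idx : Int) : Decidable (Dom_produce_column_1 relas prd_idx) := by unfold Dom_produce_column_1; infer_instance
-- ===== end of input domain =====

-- B re-implements A as a two-phase pipeline (parse into segments, then render); same cost, proved equal on Pre_.
-- Both loop ports carry a fuel argument (= relas.length, enough for every iteration) purely to make them total.

-- ===== PORT A =====
-- the for-loop computing max_label/max_num over labels.items()
def pvArgmaxA (label : String) (items : List (String × Int)) : String × Int :=
  items.foldl (fun st kv => if kv.2 > st.2 then (kv.1, kv.2) else st) (label, 0)

-- inner 'while i < len(relas) and len(relas[i]) > 0: if relas[i][0][0]=='I': … else break'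
def pvInnerA (fuel : Nat) (relas : List (List String)) (i : Nat)
    (labels : PySem.Dict String Int) : Nat × PySem.Dict String Int :=
  match fuel with
  | 0 => (i, labels)
  | fuel + 1 =>
    if i < relas.length ∧ (relas.getD i []).length > 0 then
      if PySem.Str.pyGet? ((relas.getD i []).headD "") 0 = some 'I' then
        let lab := PySem.Str.slice ((relas.getD i []).headD "") (some 2) none
        pvInnerA fuel relas (i + 1) (labels.insert lab (labels.getD lab 0 + 1))
      else (i, labels)
    else (i, labels)

-- outer 'while i < len(relas)'
def pvLoopA (fuel : Nat) (relas : List (List String)) (prd_idx : Int) (i : Nat)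
    (column : List String) (count : Int) : List String × Int :=
  match fuel with
  | 0 => (column, count)
  | fuel + 1 =>
    if i < relas.length then
      let rel := relas.getD i []
      if (i : Int) + 1 = prd_idx then
        pvLoopA fuel relas prd_idx (i + 1) (column ++ ["(V*)"]) count
      else if rel = ["[prd]"] then
        pvLoopA fuel relas prd_idx (i + 1) (column ++ ["*"]) count
      else if rel.length = 0 then
        pvLoopA fuel relas prd_idx (i + 1) (column ++ ["*"]) count
      else
        let s_rel := rel.headD ""
        let label := PySem.Str.slice s_rel (some 2) none
        if PySem.Str.pyGet? s_rel 0 = some 'I' then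
          pvLoopA fuel relas prd_idx (i + 1) (column ++ ["*"]) (count + 1)
        else
          let r := pvInnerA relas.length relas (i + 1) ((PySem.Dict.empty).insert label 1)
          let len := r.1 - i
          let max_label := (pvArgmaxA label r.2.items).1
          if len = 1 then
            pvLoopA fuel relas prd_idx r.1
              (column ++ [String.ofList ('(' :: max_label.toList ++ ['*', ')'])]) count
          else
            pvLoopA fuel relas prd_idx r.1
              (column ++ [String.ofList ('(' :: max_label.toList ++ ['*'])]
                ++ List.replicate (len - 2) "*" ++ ["*)"]) count
    else (column, count)

def produce_column_1 (relas : List (List String)) (prd_idx : Int) : List String × Int :=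
  pvLoopA relas.length relas prd_idx 0 [] 0

-- ===== PORT B =====
inductive PvSeg where
  | mark : String → PvSeg
  | span : Nat → String → PySem.Dict String Int → PvSeg
deriving Repr, DecidableEq

-- Source B inner 'while j < n and len(relas[j]) > 0 and relas[j][0][0] == 'I''
def pvInnerB (fuel : Nat) (relas : List (List String)) (j : Nat)
    (labels : PySem.Dict String Int) : Nat × PySem.Dict String Int :=
  match fuel with
  | 0 => (j, labels)
  | fuel + 1 =>
    if j < relas.length ∧ (relas.getD j []).length > 0 ∧
        PySem.Str.pyGet? ((relas.getD j []).headD "") 0 = some 'I' then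
      let lab := PySem.Str.slice ((relas.getD j []).headD "") (some 2) none
      pvInnerB fuel relas (j + 1) (labels.insert lab (labels.getD lab 0 + 1))
    else (j, labels)

-- pass 1: segmentation
def pvPass1 (fuel : Nat) (relas : List (List String)) (prd_idx : Int) (i : Nat)
    (segs : List PvSeg) (count : Int) : List PvSeg × Int :=
  match fuel with
  | 0 => (segs, count)
  | fuel + 1 =>
    if i < relas.length then
      let rel := relas.getD i []
      if (i : Int) + 1 = prd_idx then
        pvPass1 fuel relas prd_idx (i + 1) (segs ++ [.mark "(V*)"]) count
      else if rel = ["[prd]"] ∨ rel.length = 0 then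
        pvPass1 fuel relas prd_idx (i + 1) (segs ++ [.mark "*"]) count
      else if PySem.Str.pyGet? (rel.headD "") 0 = some 'I' then
        pvPass1 fuel relas prd_idx (i + 1) (segs ++ [.mark "*"]) (count + 1)
      else
        let first := PySem.Str.slice (rel.headD "") (some 2) none
        let r := pvInnerB relas.length relas (i + 1) ((PySem.Dict.empty).insert first 1)
        pvPass1 fuel relas prd_idx r.1 (segs ++ [.span (r.1 - i) first r.2]) count
    else (segs, count)

-- pass 2: render one segment
def pvRenderSeg : PvSeg → List String
  | .mark s => [s]
  | .span len first labels =>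
      let best := (labels.items.foldl (fun st kv => if kv.2 > st.2 then kv else st) (first, (0 : Int))).1
      if len = 1 then [String.ofList ('(' :: best.toList ++ ['*', ')'])]
      else [String.ofList ('(' :: best.toList ++ ['*'])] ++ List.replicate (len - 2) "*" ++ ["*)"]

def produce_column_1_alt (relas : List (List String)) (prd_idx : Int) : List String × Int :=
  let r := pvPass1 relas.length relas prd_idx 0 [] 0
  (r.1.foldl (fun col s => col ++ pvRenderSeg s) [], r.2)

-- ===== PRECONDITION & SPEC =====
-- Pre_ excludes inputs containing a nonempty relation whose first string is empty: when such a
-- relation is inspected, Python A raises IndexError on s_rel[0] (and B raises identically); the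
-- condition is slightly stronger than the exact raise set — a malformed relation sitting exactly at
-- the predicate position is skipped unread by both programs, but is excluded anyway to keep Pre_
-- a closed-form per-element condition.
def Pre_produce_column_1 (relas : List (List String)) (prd_idx : Int) : Prop :=
  ∀ rel ∈ relas, rel = [] ∨ rel.headD "" ≠ ""
instance (relas : List (List String)) (prd_idx : Int) : Decidable (Pre_produce_column_1 relas prd_idx) := by
  unfold Pre_produce_column_1; infer_instance

def pvWitness_produce_column_1 : List (List String) × Int :=
  ([["B-A0"], ["I-A0"], ["I-A1"], [], ["[prd]"], ["I-A0"]], 4)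

def Spec_produce_column_1 (relas : List (List String)) (prd_idx : Int) (out : List String × Int) : Prop := out = produce_column_1_alt relas prd_idx
instance (relas : List (List String)) (prd_idx : Int) (out : List String × Int) : Decidable (Spec_produce_column_1 relas prd_idx out) := by unfold Spec_produce_column_1; infer_instance

-- ===== CLAIM (what is proved, stated in full; the proofs are below) =====
def Claim_equal_produce_column_1 : Prop := ∀ (relas : List (List String)) (prd_idx : Int), Dom_produce_column_1 relas prd_idx → Pre_produce_column_1 relas prd_idx → Spec_produce_column_1 relas prd_idx (produce_column_1 relas prd_idx)

-- ===== LEMMAS AND PROOFS =====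

-- the two inner I-run loops compute the same pair
lemma pvInner_eq (relas : List (List String)) :
    ∀ fuel j labels, pvInnerB fuel relas j labels = pvInnerA fuel relas j labels := by
  intro fuel
  induction fuel with
  | zero => intro j labels; rfl
  | succ fuel ih =>
      intro j labels
      rw [pvInnerA, pvInnerB]
      by_cases h : j < relas.length ∧ (relas.getD j []).length > 0
      · by_cases hI : PySem.Str.pyGet? ((relas.getD j []).headD "") 0 = some 'I'
        · rw [if_pos h, if_pos hI, if_pos ⟨h.1, h.2, hI⟩]
          exact ih _ _
        · rw [if_pos h, if_neg hI, if_neg (fun hc => hI hc.2.2)]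
      · rw [if_neg h, if_neg (fun hc => h ⟨hc.1, hc.2.1⟩)]

-- accumulator normalization for pass 1
lemma pvPass1_acc (relas : List (List String)) (prd_idx : Int) :
    ∀ fuel i segs count, pvPass1 fuel relas prd_idx i segs count =
      (segs ++ (pvPass1 fuel relas prd_idx i [] 0).1,
       count + (pvPass1 fuel relas prd_idx i [] 0).2) := by
  intro fuel
  induction fuel with
  | zero => intro i segs count; simp [pvPass1]
  | succ fuel ih =>
      intro i segs count
      conv_rhs => rw [pvPass1]
      conv_lhs => rw [pvPass1]
      by_cases h : i < relas.length
      · simp only [if_pos h, List.nil_append]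
        split_ifs with h1 h2 h3
        · rw [ih (i + 1) (segs ++ [PvSeg.mark "(V*)"]) count, ih (i + 1) [PvSeg.mark "(V*)"] 0]
          simp
        · rw [ih (i + 1) (segs ++ [PvSeg.mark "*"]) count, ih (i + 1) [PvSeg.mark "*"] 0]
          simp
        · rw [ih (i + 1) (segs ++ [PvSeg.mark "*"]) (count + 1), ih (i + 1) [PvSeg.mark "*"] (0 + 1)]
          simp
          omega
        · set lab := PySem.Str.slice ((relas.getD i []).headD "") (some 2) none with hlab
          set r := pvInnerB relas.length relas (i + 1) ((PySem.Dict.empty).insert lab 1) with hr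
          rw [ih r.1 (segs ++ [PvSeg.span (r.1 - i) lab r.2]) count,
             ih r.1 [PvSeg.span (r.1 - i) lab r.2] 0]
          simp
      · simp [if_neg h]

-- the two argmax folds agree (A rebuilds the pair, B keeps it)
lemma pvArgmax_eq (label : String) (items : List (String × Int)) :
    pvArgmaxA label items =
      items.foldl (fun st kv => if kv.2 > st.2 then kv else st) (label, (0 : Int)) := by
  unfold pvArgmaxA
  have hfun : (fun (st kv : String × Int) => if kv.2 > st.2 then (kv.1, kv.2) else st)
      = (fun (st kv : String × Int) => if kv.2 > st.2 then kv else st) := by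
    funext st kv; split <;> simp
  rw [hfun]

-- main correspondence: A's loop = render of B's pass-1 (same fuel)
lemma pvMain (relas : List (List String)) (prd_idx : Int) :
    ∀ fuel i column count, pvLoopA fuel relas prd_idx i column count =
      (column ++ (pvPass1 fuel relas prd_idx i [] 0).1.flatMap pvRenderSeg,
       count + (pvPass1 fuel relas prd_idx i [] 0).2) := by
  intro fuel
  induction fuel with
  | zero => intro i column count; simp [pvLoopA, pvPass1]
  | succ fuel ih =>
      intro i column count
      conv_rhs => rw [pvPass1]
      conv_lhs => rw [pvLoopA]
      by_cases h : i < relas.length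
      · simp only [if_pos h, List.nil_append]
        by_cases h1 : (i : Int) + 1 = prd_idx
        · simp only [if_pos h1]
          rw [ih (i + 1), pvPass1_acc relas prd_idx fuel (i + 1) [PvSeg.mark "(V*)"] 0]
          simp [pvRenderSeg]
        · simp only [if_neg h1]
          by_cases h2 : relas.getD i [] = ["[prd]"]
          · simp only [if_pos h2, if_pos (Or.inl h2)]
            rw [ih (i + 1), pvPass1_acc relas prd_idx fuel (i + 1) [PvSeg.mark "*"] 0]
            simp [pvRenderSeg]
          · simp only [if_neg h2]
            by_cases h3 : (relas.getD i []).length = 0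
            · simp only [if_pos h3, if_pos (Or.inr h3)]
              rw [ih (i + 1), pvPass1_acc relas prd_idx fuel (i + 1) [PvSeg.mark "*"] 0]
              simp [pvRenderSeg]
            · have h23 : ¬ (relas.getD i [] = ["[prd]"] ∨ (relas.getD i []).length = 0) := by
                intro hc; rcases hc with hc | hc
                · exact h2 hc
                · exact h3 hc
              simp only [if_neg h3, if_neg h23]
              by_cases h4 : PySem.Str.pyGet? ((relas.getD i []).headD "") 0 = some 'I'
              · simp only [if_pos h4]
                rw [ih (i + 1), pvPass1_acc relas prd_idx fuel (i + 1) [PvSeg.mark "*"] (0 + 1)]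
                simp [pvRenderSeg]
                omega
              · simp only [if_neg h4]
                set lab := PySem.Str.slice ((relas.getD i []).headD "") (some 2) none with hlab
                rw [pvInner_eq]
                set r := pvInnerA relas.length relas (i + 1) ((PySem.Dict.empty).insert lab 1) with hr
                by_cases h5 : r.1 - i = 1
                · simp only [if_pos h5]
                  rw [ih r.1, pvPass1_acc relas prd_idx fuel r.1 [PvSeg.span (r.1 - i) lab r.2] 0]
                  simp [pvRenderSeg, pvArgmax_eq, h5]
                · simp only [if_neg h5]
                  rw [ih r.1, pvPass1_acc relas prd_idx fuel r.1 [PvSeg.span (r.1 - i) lab r.2] 0]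
                  simp [pvRenderSeg, pvArgmax_eq, h5]
      · simp [if_neg h]

-- ===== VERDICT (by name: the statement is the Claim_ definition above) =====
theorem produce_column_1_spec : Claim_equal_produce_column_1 := by
  intro relas prd_idx _ _
  unfold Spec_produce_column_1 produce_column_1 produce_column_1_alt
  rw [pvMain relas prd_idx relas.length 0 [] 0]
  simp [List.flatMap_def]
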